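-- pv_equiv track=rewrite | github.com/minichate/google-manifest-generator | mitel/util.py | StringAdd
-- ===== SOURCE A (Python) =====
-- def StringAdd( instr, inc ):
--     """ Will increment the right most chars of string instr by inc. Will rollover to left, and  stop incrementing when first non aplhanumeric char reached. Will not increase the length of the string, so rollover may occur.
--     Example
--     "aaa" + 1 = "aab"
--     "aaa" + 26 = "aba"
--     "aaa" + 27 = "abb"
--     "aa a" + "53" = "aa b"  - stoped incrementing at the space char
--     """
--     i = len(instr)-1
--
--     inc = int(inc)
--
--     # is string empty?
--     if i < 0:
--         return instr
--     last = instr[i]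
--
--     str = instr[:-1]   # remove last char
--     #print "begin instr=%s str=%s  last char=%s=%d" %( instr, str, last, ord(last))
--
--     hi=0
--     lo=0
--     radix=0
--
--     if last.isalnum():
--         if last.isdigit():
--             hi=ord('9')
--             lo=ord('0')
--             radix=10
--         elif last.islower():
--             hi=ord('z')
--             lo=ord('a')
--             radix=26
--         elif last.isupper:
--             hi=ord('Z')
--             lo=ord('A')
--             radix=26
--         else:
--             return  str + last   # return origional string unchanged
--     else:
--         return  str + last   # return origional string unchanged
--
--
--     newlast = ord(last[0]) + inc
--     while newlast > hi:
--         #rollover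
--         str = StringAdd( str, '1')
--         #print "x str=%s newlast=%d radix=%d" % (str, newlast, radix)
--         newlast -= radix
--
--     return str + chr(newlast)
-- ===== SOURCE B (Python) =====
-- def StringAdd(instr, inc):
--     """Carry-propagating rewrite: walk the string once from the right, adding the
--     whole carry at each position via one divmod-style step instead of A's
--     one-by-one rollover recursion."""
--     inc = int(inc)
--     res = list(instr)
--     carry = inc
--     i = len(res) - 1
--     while i >= 0 and carry != 0:
--         c = res[i]
--         if '0' <= c <= '9':
--             hi, radix = ord('9'), 10
--         elif 'a' <= c <= 'z':
--             hi, radix = ord('z'), 26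
--         elif 'A' <= c <= 'Z':
--             hi, radix = ord('Z'), 26
--         else:
--             break
--         v = ord(c) + carry
--         k = (v - hi + radix - 1) // radix if v > hi else 0
--         res[i] = chr(v - k * radix)
--         carry = k
--         i -= 1
--     return ''.join(res)
-- ===== Notes on version B (the rewrite author's own statement) =====
-- stated objective: faster
-- what changed: A rolls the counter over one unit at a time (one recursive StringAdd(str,'1') call per unit of overflow); B makes a single right-to-left pass computing each position's whole carry with one ceiling division.
import Mathlib
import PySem

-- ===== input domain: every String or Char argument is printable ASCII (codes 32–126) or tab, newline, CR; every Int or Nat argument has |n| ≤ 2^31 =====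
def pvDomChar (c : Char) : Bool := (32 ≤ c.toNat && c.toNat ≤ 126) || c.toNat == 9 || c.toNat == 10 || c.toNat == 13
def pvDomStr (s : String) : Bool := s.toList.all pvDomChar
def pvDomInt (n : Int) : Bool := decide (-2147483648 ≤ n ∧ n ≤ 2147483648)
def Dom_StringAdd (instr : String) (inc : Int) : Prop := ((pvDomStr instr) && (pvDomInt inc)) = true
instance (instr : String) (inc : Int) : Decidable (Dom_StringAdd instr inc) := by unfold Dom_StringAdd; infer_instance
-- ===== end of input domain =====

-- B replaces A's one-by-one rollover recursion (one recursive StringAdd(str,'1') call per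
-- unit of overflow) by a single right-to-left pass that adds the whole carry at each
-- position with one ceiling division; return values agree on Pre_ (where Python A returns).

-- ord(c) and chr(v); exact on the values both programs reach under Pre_ (0 ≤ v ≤ 122)
def ordC (c : Char) : Int := (c.toNat : Int)
def chrP (v : Int) : Char := Char.ofNat v.toNat

-- Python's str.isdigit / islower / isupper for ONE char; exact on ASCII (the stated Dom)
def pyIsDigitC (c : Char) : Bool := '0' ≤ c && c ≤ '9'
def pyIsLowerC (c : Char) : Bool := 'a' ≤ c && c ≤ 'z'
def pyIsUpperC (c : Char) : Bool := 'A' ≤ c && c ≤ 'Z'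

-- ===== PORT A =====
-- A's `while newlast > hi: str = StringAdd(str,'1'); newlast -= radix` loop;
-- g is the recursive call StringAdd(·, '1') on the shortened string
def rollA (g : List Char → List Char) (s : List Char) (v hi r : Int) (hr : 0 < r) : List Char :=
  if v > hi then rollA g (g s) (v - r) hi r hr
  else s ++ [chrP v]
termination_by (v - hi).toNat
decreasing_by omega

-- fuel only makes the recursion on the shortened string structural; StringAdd calls it
-- with fuel = length + 1 > recursion depth, so the fuel-0 branch is never reached
def StringAddAF : Nat → List Char → Int → List Char
  | 0, l, _ => l
  | (fuel+1), l, inc =>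
    match l.getLast? with
    | none => l                       -- i < 0: empty string, returned unchanged
    | some last =>
      let str := l.dropLast           -- instr[:-1]
      if pyIsDigitC last then
        rollA (fun s => StringAddAF fuel s 1) str (ordC last + inc) 57 10 (by norm_num)
      else if pyIsLowerC last then
        rollA (fun s => StringAddAF fuel s 1) str (ordC last + inc) 122 26 (by norm_num)
      else if pyIsUpperC last then
        rollA (fun s => StringAddAF fuel s 1) str (ordC last + inc) 90 26 (by norm_num)
      else
        str ++ [last]                 -- non-alphanumeric last char: unchanged

def StringAdd (instr : String) (inc : Int) : String :=
  String.ofList (StringAddAF (instr.toList.length + 1) instr.toList inc)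

-- ===== PORT B =====
-- the class-test chain of Source B's loop body: some (hi, radix), or none = break
def classifyB (c : Char) : Option (Int × Int) :=
  if pyIsDigitC c then some (57, 10)
  else if pyIsLowerC c then some (122, 26)
  else if pyIsUpperC c then some (90, 26)
  else none

-- Source B: k = (v - hi + radix - 1) // radix if v > hi else 0
def kstep (hi r v : Int) : Int :=
  if v > hi then PySem.Int.floordiv (v - hi + r - 1) r else 0

-- Source B's while loop, walking the reversed character list with the running carry
def bLoop : List Char → Int → List Char
  | [], _ => []
  | c :: rest, carry =>
    if carry = 0 then c :: rest
    else
      match classifyB c with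
      | none => c :: rest
      | some (hi, r) =>
        let v := ordC c + carry
        let k := kstep hi r v
        chrP (v - k * r) :: bLoop rest k

def StringAdd_alt (instr : String) (inc : Int) : String :=
  String.ofList (bLoop instr.toList.reverse inc).reverse

-- ===== PRECONDITION & SPEC =====
-- Pre_ excludes exactly the inputs where Python A raises (ValueError from chr(negative)):
-- a nonempty string whose last char is alphanumeric while ord(last) + inc < 0.
-- Python B raises the same ValueError there; A returns on every input Pre_ admits.
def preB (instr : String) (inc : Int) : Bool :=
  match instr.toList.getLast? with
  | none => true
  | some c => !(pyIsDigitC c || pyIsLowerC c || pyIsUpperC c) || decide (0 ≤ ordC c + inc)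

def Pre_StringAdd (instr : String) (inc : Int) : Prop := preB instr inc = true
instance (instr : String) (inc : Int) : Decidable (Pre_StringAdd instr inc) := by
  unfold Pre_StringAdd; infer_instance

def pvWitness_StringAdd : String × Int := ("aaa", 27)

def Spec_StringAdd (instr : String) (inc : Int) (out : String) : Prop := out = StringAdd_alt instr inc
instance (instr : String) (inc : Int) (out : String) : Decidable (Spec_StringAdd instr inc out) := by unfold Spec_StringAdd; infer_instance

-- ===== CLAIM (what is proved, stated in full; the proofs are below) =====
def Claim_equal_StringAdd : Prop := ∀ (instr : String) (inc : Int), Dom_StringAdd instr inc → Pre_StringAdd instr inc → Spec_StringAdd instr inc (StringAdd instr inc)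

-- ===== LEMMAS AND PROOFS =====

-- B's pass applied to a whole (unreversed) list
def BrevL (l : List Char) (inc : Int) : List Char := (bLoop l.reverse inc).reverse

theorem ord_chr (v : Int) (h1 : 0 ≤ v) (h2 : v < 128) : ordC (chrP v) = v := by
  unfold ordC chrP
  rw [Char.toNat_ofNat, if_pos (Or.inl (by omega))]
  omega

theorem chr_ord (c : Char) : chrP (ordC c) = c := by
  unfold ordC chrP
  simp [Char.ofNat_toNat]

theorem digit_iff (c : Char) : pyIsDigitC c = true ↔ 48 ≤ c.toNat ∧ c.toNat ≤ 57 := by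
  rw [pyIsDigitC]
  rw [Bool.and_eq_true, decide_eq_true_iff, decide_eq_true_iff, Char.le_def, Char.le_def, UInt32.le_iff_toNat_le, UInt32.le_iff_toNat_le]
  rfl

theorem lower_iff (c : Char) : pyIsLowerC c = true ↔ 97 ≤ c.toNat ∧ c.toNat ≤ 122 := by
  rw [pyIsLowerC]
  rw [Bool.and_eq_true, decide_eq_true_iff, decide_eq_true_iff, Char.le_def, Char.le_def, UInt32.le_iff_toNat_le, UInt32.le_iff_toNat_le]
  rfl

theorem upper_iff (c : Char) : pyIsUpperC c = true ↔ 65 ≤ c.toNat ∧ c.toNat ≤ 90 := by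
  rw [pyIsUpperC]
  rw [Bool.and_eq_true, decide_eq_true_iff, decide_eq_true_iff, Char.le_def, Char.le_def, UInt32.le_iff_toNat_le, UInt32.le_iff_toNat_le]
  rfl

theorem classifyB_bounds {c : Char} {hi r : Int} (h : classifyB c = some (hi, r)) :
    0 < r ∧ hi - r < ordC c ∧ ordC c ≤ hi ∧ 48 ≤ hi - r + 1 ∧ hi ≤ 122 := by
  unfold classifyB at h
  split_ifs at h with h1 h2 h3 <;>
    [rw [digit_iff] at h1; rw [lower_iff] at h2; rw [upper_iff] at h3] <;>
    · injection h with h; injection h with e1 e2; subst e1; subst e2; unfold ordC; omega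

theorem chr_toNat (v : Int) (h1 : 0 ≤ v) (h2 : v < 128) : (chrP v).toNat = v.toNat := by
  unfold chrP; rw [Char.toNat_ofNat, if_pos (Or.inl (by omega))]

theorem classifyB_chr {c : Char} {hi r : Int} (h : classifyB c = some (hi, r))
    (v : Int) (h1 : hi - r < v) (h2 : v ≤ hi) : classifyB (chrP v) = some (hi, r) := by
  have hb := classifyB_bounds h
  unfold classifyB at h ⊢
  have ht := chr_toNat v (by omega) (by omega)
  split_ifs at h with h1' h2' h3' <;> injection h with h <;> injection h with e1 e2 <;>
    subst e1 <;> subst e2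
  · rw [if_pos (by rw [digit_iff]; omega)]
  · rw [if_neg (by rw [digit_iff]; omega), if_pos (by rw [lower_iff]; omega)]
  · rw [if_neg (by rw [digit_iff]; omega), if_neg (by rw [lower_iff]; omega),
      if_pos (by rw [upper_iff]; omega)]

theorem kstep_spec {hi r : Int} (hr : 0 < r) {v : Int} (hv : hi - r < v) :
    0 ≤ kstep hi r v ∧ hi - r < v - kstep hi r v * r ∧ v - kstep hi r v * r ≤ hi := by
  unfold kstep
  split_ifs with h
  · rw [PySem.Int.floordiv_eq_ediv_of_pos hr]
    set n := v - hi + r - 1 with hn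
    have hdm := Int.mul_ediv_add_emod n r
    have hm1 := Int.emod_nonneg n (ne_of_gt hr)
    have hm2 := Int.emod_lt_of_pos n hr
    set q := n / r with hq
    set m := n % r with hm
    have hqr : r * q = n - m := by omega
    have hq0 : 0 ≤ q := by
      by_contra hneg
      have : r * q ≤ 0 := mul_nonpos_of_nonneg_of_nonpos hr.le (by omega)
      omega
    refine ⟨hq0, ?_, ?_⟩ <;> · rw [mul_comm]; omega
  · simp; omega

theorem kstep_unique {hi r v k : Int} (hr : 0 < r) (hv : hi - r < v) (_hk : 0 ≤ k)
    (hb1 : hi - r < v - k * r) (hb2 : v - k * r ≤ hi) : k = kstep hi r v := by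
  obtain ⟨hk', hb1', hb2'⟩ := kstep_spec hr hv (v := v)
  set k' := kstep hi r v
  rcases lt_trichotomy k k' with h | h | h
  · have : (k + 1) * r ≤ k' * r := mul_le_mul_of_nonneg_right (by omega) hr.le
    nlinarith
  · exact h
  · have : (k' + 1) * r ≤ k * r := mul_le_mul_of_nonneg_right (by omega) hr.le
    nlinarith

theorem bLoop_zero (m : List Char) : bLoop m 0 = m := by
  cases m <;> simp [bLoop]

theorem bLoop_len (m : List Char) (c : Int) : (bLoop m c).length = m.length := by
  induction m generalizing c with
  | nil => rfl
  | cons x rest ih =>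
    rw [bLoop]
    split_ifs with h
    · rfl
    · cases hcl : classifyB x with
      | none => rfl
      | some p =>
        obtain ⟨hi, r⟩ := p
        simp only [List.length_cons, ih]

theorem bLoop_add (m : List Char) (a b : Int) (ha : 0 ≤ a) (hb : 0 ≤ b) :
    bLoop (bLoop m a) b = bLoop m (a + b) := by
  induction m generalizing a b with
  | nil => rfl
  | cons c rest ih =>
    by_cases ha0 : a = 0
    · subst ha0; rw [bLoop_zero]; ring_nf
    by_cases hb0 : b = 0
    · subst hb0; rw [bLoop_zero]; ring_nf
    have hab : a + b ≠ 0 := by omega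
    rw [bLoop, if_neg ha0]
    cases hcl : classifyB c with
    | none =>
      rw [bLoop, if_neg hb0, hcl, bLoop, if_neg hab, hcl]
    | some p =>
      obtain ⟨hi, r⟩ := p
      obtain ⟨hr, hlo, hhi, h48, h122⟩ := classifyB_bounds hcl
      set v1 := ordC c + a with hv1
      have hv1b : hi - r < v1 := by omega
      set k1 := kstep hi r v1 with hk1
      obtain ⟨hk1n, hc1lo, hc1hi⟩ := kstep_spec hr hv1b
      rw [← hk1] at hk1n hc1lo hc1hi
      have hordc1 : ordC (chrP (v1 - k1 * r)) = v1 - k1 * r :=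
        ord_chr _ (by omega) (by omega)
      have hclc1 : classifyB (chrP (v1 - k1 * r)) = some (hi, r) :=
        classifyB_chr hcl _ hc1lo hc1hi
      rw [bLoop, if_neg hb0, hclc1]
      dsimp only
      set v2 := ordC (chrP (v1 - k1 * r)) + b with hv2
      have hv2e : v2 = v1 - k1 * r + b := by rw [hv2, hordc1]
      have hv2b : hi - r < v2 := by omega
      set k2 := kstep hi r v2 with hk2
      obtain ⟨hk2n, hc2lo, hc2hi⟩ := kstep_spec hr hv2b
      rw [← hk2] at hk2n hc2lo hc2hi
      rw [bLoop, if_neg hab, hcl]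
      dsimp only
      set v := ordC c + (a + b) with hv
      have hvb : hi - r < v := by omega
      have hve : v - (k1 + k2) * r = v2 - k2 * r := by rw [hv2e]; ring_nf; omega
      have hksum : k1 + k2 = kstep hi r v :=
        kstep_unique hr hvb (by omega) (by omega) (by omega)
      rw [← hksum, ih _ _ hk1n hk2n]
      simp only [hve]

theorem rollA_unroll (g : List Char → List Char) (hi r : Int) (hr : 0 < r)
    (s : List Char) (v : Int) (hv : hi - r < v) :
    rollA g s v hi r hr = g^[(kstep hi r v).toNat] s ++ [chrP (v - kstep hi r v * r)] := by
  by_cases h : v > hi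
  · rw [rollA, if_pos h]
    have hv' : hi - r < v - r := by omega
    rw [rollA_unroll g hi r hr (g s) (v - r) hv']
    set k' := kstep hi r (v - r) with hk'
    obtain ⟨hk'n, hb1, hb2⟩ := kstep_spec hr hv'
    rw [← hk'] at hk'n hb1 hb2
    have hx : v - (k' + 1) * r = v - r - k' * r := by ring
    have : k' + 1 = kstep hi r v :=
      kstep_unique hr (by omega) (by omega) (by omega) (by omega)
    rw [← this]
    have ht : (k' + 1).toNat = k'.toNat + 1 := by omega
    rw [ht, Function.iterate_succ_apply]
    congr 2
    ring_nf
  · rw [rollA, if_neg h]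
    have : kstep hi r v = 0 := by unfold kstep; rw [if_neg h]
    rw [this]
    simp
termination_by (v - hi).toNat
decreasing_by omega

theorem caseCls (fuel : Nat)
    (IH : ∀ (l : List Char) (inc : Int), l.length < fuel → StringAddAF fuel l inc = BrevL l inc)
    (str : List Char) (last : Char) (hlen : str.length < fuel)
    (hi r : Int) (hcl : classifyB last = some (hi, r)) (hr : 0 < r) (inc : Int) :
    rollA (fun s => StringAddAF fuel s 1) str (ordC last + inc) hi r hr
      = BrevL (str ++ [last]) inc := by
  obtain ⟨hr', hlo, hhi, h48, h122⟩ := classifyB_bounds hcl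
  have hrev : (str ++ [last]).reverse = last :: str.reverse := by
    rw [List.reverse_append]; rfl
  have hiter : ∀ n : Nat, (fun s => StringAddAF fuel s 1)^[n] str
      = (bLoop str.reverse (n : Int)).reverse := by
    intro n
    induction n with
    | zero => rw [Function.iterate_zero_apply]; norm_num [bLoop_zero]
    | succ n ihn =>
      rw [Function.iterate_succ_apply', ihn]
      have hlen2 : ((bLoop str.reverse (n : Int)).reverse).length < fuel := by
        rw [List.length_reverse, bLoop_len, List.length_reverse]; exact hlen
      rw [IH _ 1 hlen2]
      unfold BrevL
      rw [List.reverse_reverse, bLoop_add _ _ _ (by positivity) (by norm_num)]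
      push_cast
      ring_nf
  set v := ordC last + inc with hv
  by_cases hvhi : v > hi
  · have hv' : hi - r < v := by omega
    rw [rollA_unroll _ hi r hr str v hv']
    obtain ⟨hkn, hb1, hb2⟩ := kstep_spec hr hv'
    have hinc : inc ≠ 0 := by omega
    unfold BrevL
    rw [hrev, bLoop, if_neg hinc, hcl]
    dsimp only
    rw [← hv, List.reverse_cons, hiter (kstep hi r v).toNat]
    have hcast : (((kstep hi r v).toNat : Nat) : Int) = kstep hi r v := by omega
    rw [hcast]
  · rw [rollA, if_neg hvhi]
    unfold BrevL
    rw [hrev]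
    by_cases hinc : inc = 0
    · subst hinc
      rw [bLoop_zero, List.reverse_cons, List.reverse_reverse]
      have : v = ordC last := by omega
      rw [this, chr_ord]
    · rw [bLoop, if_neg hinc, hcl]
      dsimp only
      rw [← hv]
      have hk0 : kstep hi r v = 0 := by unfold kstep; rw [if_neg hvhi]
      rw [hk0, bLoop_zero, List.reverse_cons, List.reverse_reverse]
      norm_num

theorem mainL (fuel : Nat) : ∀ (l : List Char) (inc : Int), l.length < fuel →
    StringAddAF fuel l inc = BrevL l inc := by
  induction fuel with
  | zero => intro l inc h; omega
  | succ fuel IH =>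
    intro l inc hlen
    cases hl : l.getLast? with
    | none =>
      have : l = [] := by cases l with | nil => rfl | cons a t => simp at hl
      subst this
      rw [StringAddAF]
      rfl
    | some last =>
      have hne : l ≠ [] := by rintro rfl; simp at hl
      have hsplit : l.dropLast ++ [last] = l := List.dropLast_append_getLast? last hl
      have hlen2 : l.dropLast.length < fuel := by
        rw [List.length_dropLast]
        have : 0 < l.length := List.length_pos_of_ne_nil hne
        omega
      rw [StringAddAF, hl]
      dsimp only
      by_cases hd : pyIsDigitC last
      · rw [if_pos hd]
        have hcl : classifyB last = some (57, 10) := by unfold classifyB; rw [if_pos hd]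
        rw [caseCls fuel IH _ _ hlen2 _ _ hcl (by norm_num) inc, hsplit]
      · rw [if_neg hd]
        by_cases hw : pyIsLowerC last
        · rw [if_pos hw]
          have hcl : classifyB last = some (122, 26) := by
            unfold classifyB; rw [if_neg hd, if_pos hw]
          rw [caseCls fuel IH _ _ hlen2 _ _ hcl (by norm_num) inc, hsplit]
        · rw [if_neg hw]
          by_cases hu : pyIsUpperC last
          · rw [if_pos hu]
            have hcl : classifyB last = some (90, 26) := by
              unfold classifyB; rw [if_neg hd, if_neg hw, if_pos hu]
            rw [caseCls fuel IH _ _ hlen2 _ _ hcl (by norm_num) inc, hsplit]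
          · rw [if_neg hu]
            have hcl : classifyB last = none := by
              unfold classifyB; rw [if_neg hd, if_neg hw, if_neg hu]
            unfold BrevL
            conv_rhs => rw [← hsplit]
            rw [List.reverse_append]
            by_cases hinc : inc = 0
            · subst hinc
              rw [bLoop_zero]
              simp
            · rw [List.reverse_singleton, List.singleton_append, bLoop, if_neg hinc, hcl]
              simp

-- ===== VERDICT (by name: the statement is the Claim_ definition above) =====
theorem StringAdd_spec : Claim_equal_StringAdd := by
  intro instr inc _ _
  unfold Spec_StringAdd StringAdd StringAdd_alt
  rw [mainL _ _ _ (Nat.lt_succ_self _)]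
  rfl
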